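-- pv_equiv track=rewrite | github.com/shantanubafna/GEOtcha | scripts/build_ontologies.py | bfs_descendants
-- ===== SOURCE A (Python) =====
-- from collections import defaultdict, deque
--
-- def bfs_descendants(
--     children_map: dict[str, set[str]],
--     root_ids: list[str],
--     max_depth: int | None = None,
-- ) -> set[str]:
--     """BFS from root terms, return descendant IDs within max_depth."""
--     visited: set[str] = set()
--     queue: deque[tuple[str, int]] = deque()
--
--     for rid in root_ids:
--         queue.append((rid, 0))
--
--     while queue:
--         term_id, depth = queue.popleft()
--         if term_id in visited:
--             continue
--         visited.add(term_id)
--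
--         if max_depth is not None and depth >= max_depth:
--             continue
--
--         for child_id in children_map.get(term_id, set()):
--             if child_id not in visited:
--                 queue.append((child_id, depth + 1))
--
--     return visited
-- ===== SOURCE B (Python) =====
-- def bfs_descendants(
--     children_map: dict[str, set[str]],
--     root_ids: list[str],
--     max_depth: int | None = None,
-- ) -> set[str]:
--     """Level-synchronized BFS: process whole depth levels at a time."""
--     visited: set[str] = set()
--     frontier: list[str] = list(root_ids)
--     depth = 0
--     while frontier:
--         next_frontier: list[str] = []
--         for term_id in frontier:
--             if term_id in visited:
--                 continue
--             visited.add(term_id)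
--             if max_depth is None or depth < max_depth:
--                 next_frontier.extend(
--                     child_id
--                     for child_id in children_map.get(term_id, set())
--                     if child_id not in visited
--                 )
--         frontier = next_frontier
--         depth += 1
--     return visited
-- ===== Notes on version B (the rewrite author's own statement) =====
-- stated objective: alternative
-- what changed: Replaced the single deque loop over (node, depth) tuples by a level-synchronized BFS: nested loops over whole frontier lists with an explicit depth counter, no queue and no per-node depth tags.
import Mathlib
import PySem

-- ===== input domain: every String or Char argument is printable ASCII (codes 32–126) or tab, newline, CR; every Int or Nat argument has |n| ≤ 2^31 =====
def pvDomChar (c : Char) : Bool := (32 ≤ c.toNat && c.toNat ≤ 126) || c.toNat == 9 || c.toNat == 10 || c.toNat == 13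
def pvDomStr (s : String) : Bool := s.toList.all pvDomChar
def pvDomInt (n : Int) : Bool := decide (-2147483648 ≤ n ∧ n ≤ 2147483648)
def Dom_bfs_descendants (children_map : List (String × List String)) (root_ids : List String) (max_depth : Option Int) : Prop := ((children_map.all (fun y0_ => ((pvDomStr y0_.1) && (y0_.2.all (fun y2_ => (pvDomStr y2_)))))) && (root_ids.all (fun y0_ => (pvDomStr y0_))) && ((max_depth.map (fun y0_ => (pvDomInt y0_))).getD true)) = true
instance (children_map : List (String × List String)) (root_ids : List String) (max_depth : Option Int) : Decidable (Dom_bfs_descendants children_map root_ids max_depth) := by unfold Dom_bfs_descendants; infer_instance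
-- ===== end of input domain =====

-- B replaces A's single deque loop over (node, depth) tuples by a level-synchronized BFS
-- (nested loops over whole frontier lists with an explicit depth counter); same return value.

-- ===== PORT A =====
-- children_map.get(term_id, set()) : first-match association-list lookup with default []
def pvGet (children_map : List (String × List String)) (t : String) : List String :=
  (children_map.lookup t).getD []

-- termination potential: total children mass of not-yet-visited map entries (used with queue length)
def pvS (children_map : List (String × List String)) (visited : List String) : Nat :=
  (children_map.map (fun p => if p.1 ∈ visited then 0 else p.2.length)).sum

theorem pvS_append_le (cm : List (String × List String)) (v : List String) (t : String) :
    pvS cm (v ++ [t]) ≤ pvS cm v := by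
  induction cm with
  | nil => simp [pvS]
  | cons p tl ih =>
    simp only [pvS, List.map_cons, List.sum_cons] at *
    have : (if p.1 ∈ v ++ [t] then 0 else p.2.length) ≤ (if p.1 ∈ v then 0 else p.2.length) := by
      by_cases h : p.1 ∈ v
      · simp [List.mem_append, h]
      · simp only [h, if_neg, not_false_iff]
        split <;> simp
    omega

theorem pvS_add_le (cm : List (String × List String)) (v : List String) (t : String) :
    pvS cm (PySem.Set.add v t) ≤ pvS cm v := by
  by_cases h : t ∈ v
  · simp [PySem.Set.add_of_mem h]
  · simpa [PySem.Set.add_of_not_mem h] using pvS_append_le cm v t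

theorem pvS_add_get (cm : List (String × List String)) (v : List String) (t : String)
    (h : t ∉ v) : pvS cm (PySem.Set.add v t) + (pvGet cm t).length ≤ pvS cm v := by
  rw [PySem.Set.add_of_not_mem h]
  induction cm with
  | nil => simp [pvS, pvGet]
  | cons p tl ih =>
    obtain ⟨k, cs⟩ := p
    by_cases hk : k = t
    · subst hk
      have e1 : pvGet ((k, cs) :: tl) k = cs := by simp [pvGet, List.lookup]
      have e2 : pvS ((k, cs) :: tl) (v ++ [k]) = pvS tl (v ++ [k]) := by
        simp [pvS, List.mem_append]
      have e3 : pvS ((k, cs) :: tl) v = cs.length + pvS tl v := by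
        simp [pvS, h]
      have h4 := pvS_append_le tl v k
      rw [e1, e2, e3]; omega
    · have hk' : t ≠ k := Ne.symm hk
      have e1 : pvGet ((k, cs) :: tl) t = pvGet tl t := by
        simp [pvGet, List.lookup, show (t == k) = false from by simpa using hk']
      by_cases hv : k ∈ v
      · have hv2 : k ∈ v ++ [t] := List.mem_append_left _ hv
        simp only [pvS, List.map_cons, List.sum_cons, hv, hv2, if_pos, e1] at *
        omega
      · have hv2 : k ∉ v ++ [t] := by simp [hv, hk]
        simp only [pvS, List.map_cons, List.sum_cons, hv, hv2, e1] at ih ⊢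
        omega

-- 'for child_id in …: if child_id not in visited: queue.append((child_id, depth + 1))' as its filter form
theorem foldl_enqueue_eq (v : List String) (d : Int) (l : List String) (rest : List (String × Int)) :
    l.foldl (fun q c => if c ∉ v then q ++ [(c, d + 1)] else q) rest
      = rest ++ (l.filter (fun c => c ∉ v)).map (fun c => (c, d + 1)) := by
  simpa using PySem.List.foldl_append_if (p := fun c => decide (c ∉ v)) (f := fun c => (c, d + 1)) l rest

-- 'max_depth is not None and depth >= max_depth'
def pvCondA (md : Option Int) (d : Int) : Bool :=
  match md with | some m => decide (m ≤ d) | none => false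

-- 'max_depth is None or depth < max_depth'
def pvCondB (md : Option Int) (d : Int) : Bool :=
  match md with | some m => decide (d < m) | none => true

-- A's while loop: pop (term_id, depth) from the queue head
def bfsLoopA (cm : List (String × List String)) (md : Option Int)
    (visited : PySem.Set String) (queue : List (String × Int)) : List String :=
  match queue with
  | [] => visited
  | (t, d) :: rest =>
    if h : t ∈ visited then bfsLoopA cm md visited rest
    else
      let visited' := PySem.Set.add visited t
      if pvCondA md d then
        bfsLoopA cm md visited' rest
      else
        bfsLoopA cm md visited'
          ((pvGet cm t).foldl (fun q c => if c ∉ visited' then q ++ [(c, d + 1)] else q) rest)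
termination_by pvS cm visited + queue.length
decreasing_by
  · simp only [List.length_cons]; omega
  · have := pvS_add_le cm visited t
    simp only [List.length_cons]; omega
  · have h1 := pvS_add_get cm visited t h
    simp only [dite_eq_ite]
    rw [foldl_enqueue_eq]
    have h2 : ((pvGet cm t).filter (fun c => c ∉ PySem.Set.add visited t)).length
        ≤ (pvGet cm t).length := List.length_filter_le _ _
    simp only [List.length_append, List.length_map, List.length_cons]
    omega

def bfs_descendants (children_map : List (String × List String)) (root_ids : List String) (max_depth : Option Int) : List String :=
  let queue := root_ids.foldl (fun q rid => q ++ [(rid, (0 : Int))]) []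
  bfsLoopA children_map max_depth PySem.Set.empty queue

-- ===== PORT B =====
-- one frontier element: skip if visited, else visit and extend next_frontier with unvisited children
def pvStepB (cm : List (String × List String)) (md : Option Int) (d : Int)
    (st : PySem.Set String × List String) (t : String) : PySem.Set String × List String :=
  if t ∈ st.1 then st
  else
    let v' := PySem.Set.add st.1 t
    (v', if pvCondB md d then
           st.2 ++ (pvGet cm t).filter (fun c => c ∉ v')
         else st.2)

theorem pvStepB_pot (cm : List (String × List String)) (md : Option Int) (d : Int)
    (st : PySem.Set String × List String) (t : String) :
    pvS cm (pvStepB cm md d st t).1 + (pvStepB cm md d st t).2.length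
      ≤ pvS cm st.1 + st.2.length := by
  unfold pvStepB
  by_cases h : t ∈ st.1
  · simp [h]
  · have h1 := pvS_add_get cm st.1 t h
    have h2 : ((pvGet cm t).filter (fun c => c ∉ PySem.Set.add st.1 t)).length
        ≤ (pvGet cm t).length := List.length_filter_le _ _
    simp only [h, if_neg, not_false_iff]
    by_cases hc : pvCondB md d = true
    · simp only [hc, if_true, List.length_append]; omega
    · simp only [hc, if_false, Bool.false_eq_true]; omega

theorem pvLevel_pot (cm : List (String × List String)) (md : Option Int) (d : Int)
    (fr : List String) (st : PySem.Set String × List String) :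
    pvS cm (fr.foldl (pvStepB cm md d) st).1 + (fr.foldl (pvStepB cm md d) st).2.length
      ≤ pvS cm st.1 + st.2.length := by
  induction fr generalizing st with
  | nil => simp
  | cons t ts ih =>
    simp only [List.foldl_cons]
    exact le_trans (ih (pvStepB cm md d st t)) (pvStepB_pot cm md d st t)

-- B's while loop: one recursive call per depth level
def bfsLoopB (cm : List (String × List String)) (md : Option Int)
    (visited : PySem.Set String) (frontier : List String) (d : Int) : List String :=
  match frontier with
  | [] => visited
  | t :: ts =>
    let st := (t :: ts).foldl (pvStepB cm md d) (visited, [])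
    bfsLoopB cm md st.1 st.2 (d + 1)
termination_by pvS cm visited + frontier.length
decreasing_by
  have := pvLevel_pot cm md d (t :: ts) (visited, [])
  simp only [List.length_cons, List.length_nil] at *
  omega

def bfs_descendants_alt (children_map : List (String × List String)) (root_ids : List String) (max_depth : Option Int) : List String :=
  bfsLoopB children_map max_depth PySem.Set.empty root_ids 0

-- ===== PRECONDITION & SPEC =====
def Spec_bfs_descendants (children_map : List (String × List String)) (root_ids : List String) (max_depth : Option Int) (out : List String) : Prop := out = bfs_descendants_alt children_map root_ids max_depth
instance (children_map : List (String × List String)) (root_ids : List String) (max_depth : Option Int) (out : List String) : Decidable (Spec_bfs_descendants children_map root_ids max_depth out) := by unfold Spec_bfs_descendants; infer_instance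

-- ===== CLAIM (what is proved, stated in full; the proofs are below) =====
def Claim_equal_bfs_descendants : Prop := ∀ (children_map : List (String × List String)) (root_ids : List String) (max_depth : Option Int), Dom_bfs_descendants children_map root_ids max_depth → Spec_bfs_descendants children_map root_ids max_depth (bfs_descendants children_map root_ids max_depth)

-- ===== LEMMAS AND PROOFS =====

-- A's depth guard is the negation of B's expand guard
theorem cond_neg (md : Option Int) (d : Int) : pvCondB md d = !(pvCondA md d) := by
  cases md with
  | none => rfl
  | some m =>
    simp only [pvCondA, pvCondB]
    by_cases hm : m ≤ d
    · simp [hm]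
    · simp [hm]; omega

-- one level of A's queue loop equals folding pvStepB over the current level
theorem loopA_level (cm : List (String × List String)) (md : Option Int) (d : Int)
    (cur : List String) (v : PySem.Set String) (nx : List String) :
    bfsLoopA cm md v (cur.map (fun t => (t, d)) ++ nx.map (fun t => (t, d + 1)))
      = bfsLoopA cm md (cur.foldl (pvStepB cm md d) (v, nx)).1
          ((cur.foldl (pvStepB cm md d) (v, nx)).2.map (fun t => (t, d + 1))) := by
  induction cur generalizing v nx with
  | nil => simp
  | cons t ts ih =>
    simp only [List.map_cons, List.cons_append, List.foldl_cons]
    rw [bfsLoopA.eq_def]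
    dsimp only
    by_cases h : t ∈ v
    · rw [dif_pos h]
      have hB : pvStepB cm md d (v, nx) t = (v, nx) := by simp [pvStepB, h]
      rw [hB]; exact ih v nx
    · rw [dif_neg h]
      by_cases hd : pvCondA md d = true
      · have hd' : pvCondB md d = false := by rw [cond_neg, hd]; rfl
        rw [if_pos hd]
        have hB : pvStepB cm md d (v, nx) t = (PySem.Set.add v t, nx) := by
          simp [pvStepB, h, hd']
        rw [hB]; exact ih (PySem.Set.add v t) nx
      · have hd' : pvCondB md d = true := by
          rw [Bool.not_eq_true] at hd
          rw [cond_neg, hd]; rfl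
        rw [if_neg hd]
        have hB : pvStepB cm md d (v, nx) t
            = (PySem.Set.add v t, nx ++ (pvGet cm t).filter (fun c => c ∉ PySem.Set.add v t)) := by
          simp [pvStepB, h, hd']
        rw [hB]
        rw [foldl_enqueue_eq]
        rw [show (ts.map (fun t => (t, d)) ++ nx.map (fun t => (t, d + 1)))
              ++ ((pvGet cm t).filter (fun c => c ∉ PySem.Set.add v t)).map (fun c => (c, d + 1))
            = ts.map (fun t => (t, d))
              ++ (nx ++ (pvGet cm t).filter (fun c => c ∉ PySem.Set.add v t)).map (fun t => (t, d + 1)) by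
          simp [List.map_append, List.append_assoc]]
        exact ih (PySem.Set.add v t) (nx ++ (pvGet cm t).filter (fun c => c ∉ PySem.Set.add v t))

theorem loopB_eq_loopA (cm : List (String × List String)) (md : Option Int)
    (v : PySem.Set String) (fr : List String) (d : Int) :
    bfsLoopB cm md v fr d = bfsLoopA cm md v (fr.map (fun t => (t, d))) := by
  induction v, fr, d using bfsLoopB.induct cm md with
  | case1 v d => simp [bfsLoopB, bfsLoopA]
  | case2 v d t ts st ih =>
    rw [bfsLoopB]
    have h := loopA_level cm md d (t :: ts) v []
    simp only [List.map_nil, List.append_nil] at h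
    rw [h]
    exact ih

-- the root queue A builds by appending is the level-0 frontier
theorem rootQueue_eq (root_ids : List String) :
    root_ids.foldl (fun q rid => q ++ [(rid, (0 : Int))]) [] = root_ids.map (fun t => (t, (0 : Int))) := by
  simpa using PySem.List.foldl_append_singleton_eq_map (f := fun rid => (rid, (0 : Int))) (l := root_ids) (acc := [])

-- ===== VERDICT (by name: the statement is the Claim_ definition above) =====
theorem bfs_descendants_spec : Claim_equal_bfs_descendants := by
  intro cm roots md _
  unfold Spec_bfs_descendants bfs_descendants bfs_descendants_alt
  rw [rootQueue_eq, ← loopB_eq_loopA]
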